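-- pv_equiv track=rewrite | github.com/2018grimonp/ProjetGroupe5 | verifyTest.py | isTest
-- ===== SOURCE A (Python) =====
-- def isTest(lignes):
--     """
--     Vérifie que le fichier envoyé est bien un fichier de tests
--     :param lignes: Un tableau contenant des strings correspondantes aux différentes lignes du texte
--     :return: True si le fichier est bien un fichier de tests Ruby, False sinon
--     """
--     for ligne in lignes:                                # On itère sur les lignes du tableau représentant le fichier
--         if "require" in ligne:                          # La commande pour inclure doit être présente dans les fichiers de test
--             mots = ligne.strip().split()                # On transforme chaque ligne en liste de mots
--             for i in range(len(mots)):                  # On itère sur les mots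
--                 if mots[i] == "require":                # On repère le mot correspondant à l'inclusion
--                     for j in range(i+1, len(mots)):     # On itère sur les mots suivant l'instruction d'inclusion
--                         if mots[j] == "'test_helper'":  # Le fichier test_helper doit être inclu au début des fichiers de test
--                             return True
--     return -1
-- ===== SOURCE B (Python) =====
-- def isTest(lignes):
--     for ligne in lignes:
--         seen = False
--         for mot in ligne.split():
--             if mot == "require":
--                 seen = True
--             elif seen and mot == "'test_helper'":
--                 return True
--     return -1
-- ===== Notes on version B (the rewrite author's own statement) =====
-- stated objective: simpler
-- what changed: Replaces A's substring pre-filter plus nested index loops (find each 'require' index, then rescan the following tokens) with one flat left-to-right pass over each line's tokens maintaining a seen_require flag.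
-- outside the precondition, e.g. on isTest(["require 'test_helper'"]): A returns True, B returns True
import Mathlib
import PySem

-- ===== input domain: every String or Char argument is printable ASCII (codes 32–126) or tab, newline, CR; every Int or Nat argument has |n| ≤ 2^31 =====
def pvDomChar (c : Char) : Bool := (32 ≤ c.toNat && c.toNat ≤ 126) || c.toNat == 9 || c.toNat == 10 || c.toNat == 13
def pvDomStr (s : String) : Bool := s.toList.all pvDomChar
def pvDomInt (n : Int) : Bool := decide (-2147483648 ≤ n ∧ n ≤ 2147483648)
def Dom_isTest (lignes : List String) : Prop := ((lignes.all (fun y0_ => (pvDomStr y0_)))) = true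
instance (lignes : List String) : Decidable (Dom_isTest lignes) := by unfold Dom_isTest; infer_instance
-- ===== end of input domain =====

-- B replaces A's nested per-line index loops by one flat token pass with a seen-require flag; objective: simpler.
-- Python's `return True` is ported as the Int 1 (True == 1 in Python); both ports are total.

-- ===== PORT A =====
-- inner loop `for j in range(i+1, len(mots)): if mots[j] == "'test_helper'": return True`
-- (indices drawn from range(...) are always in bounds, so pyGetD with default "" is exact)
def isTestScanJ (mots : List String) (js : List Int) : Bool :=
  match js with
  | [] => false
  | j :: rest =>
    if PySem.List.pyGetD mots j "" == "'test_helper'" then true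
    else isTestScanJ mots rest

-- outer loop `for i in range(len(mots)): if mots[i] == "require": ...`
def isTestScanI (mots : List String) (idxs : List Int) : Bool :=
  match idxs with
  | [] => false
  | i :: rest =>
    if PySem.List.pyGetD mots i "" == "require" then
      if isTestScanJ mots (PySem.List.pyRange (i + 1) (mots.length : Int)) then true
      else isTestScanI mots rest
    else isTestScanI mots rest

def isTest (lignes : List String) : Int :=
  match lignes with
  | [] => -1
  | ligne :: rest =>
    if PySem.Str.isIn "require" ligne then
      let mots := PySem.Str.split₀ (PySem.Str.strip ligne)
      if isTestScanI mots (PySem.List.pyRange 0 (mots.length : Int)) then 1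
      else isTest rest
    else isTest rest

-- ===== PORT B =====
-- one flat pass over the tokens of a line, carrying the seen-require flag
def isTestLine (mots : List String) (seen : Bool) : Bool :=
  match mots with
  | [] => false
  | mot :: rest =>
    if mot == "require" then isTestLine rest true
    else if seen && (mot == "'test_helper'") then true
    else isTestLine rest seen

def isTest_alt (lignes : List String) : Int :=
  match lignes with
  | [] => -1
  | ligne :: rest =>
    if isTestLine (PySem.Str.split₀ ligne) false then 1
    else isTest_alt rest

-- ===== PRECONDITION & SPEC =====
-- Python B returns the very same value as Python A on EVERY input, including True (see claim cites),
-- and the Lean ports are proved equal without any precondition (lemma isTest_eq_alt below).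
-- Pre_ exists only because on success A returns the bool True, which is not a value of the declared
-- return type int, so the Int-typed theorem cannot speak about those inputs: Pre_ excludes exactly
-- the inputs where some line's tokens contain "require" followed later by "'test_helper'".
def Pre_isTest (lignes : List String) : Prop :=
  ∀ ligne ∈ lignes, ¬ List.Sublist ["require", "'test_helper'"] (PySem.Str.split₀ ligne)
instance (lignes : List String) : Decidable (Pre_isTest lignes) := by unfold Pre_isTest; infer_instance
def pvWitness_isTest : List String := ["require foo", "bar 'test_helper'"]
def Spec_isTest (lignes : List String) (out : Int) : Prop := out = isTest_alt lignes
instance (lignes : List String) (out : Int) : Decidable (Spec_isTest lignes out) := by unfold Spec_isTest; infer_instance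

-- ===== CLAIM (what is proved, stated in full; the proofs are below) =====
def Claim_equal_isTest : Prop := ∀ (lignes : List String), Dom_isTest lignes → Pre_isTest lignes → Spec_isTest lignes (isTest lignes)

-- ===== LEMMAS AND PROOFS =====

-- with the flag already set, the flat pass is just a search for "'test_helper'"
lemma isTestLine_true (l : List String) :
    isTestLine l true = l.any (fun t => t == "'test_helper'") := by
  induction l with
  | nil => rfl
  | cons t r ih =>
    by_cases h : t = "require"
    · subst h
      simp [isTestLine, ih]
    · by_cases h2 : t = "'test_helper'"
      · subst h2
        simp [isTestLine]
      · simp [isTestLine, h, h2, ih]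

lemma isTestLine_false_of_any_false (l : List String)
    (h : l.any (fun t => t == "'test_helper'") = false) : isTestLine l false = false := by
  induction l with
  | nil => rfl
  | cons t r ih =>
    simp only [List.any_cons, Bool.or_eq_false_iff] at h
    by_cases hr : t = "require"
    · subst hr
      simp [isTestLine, isTestLine_true, h.2]
    · simp [isTestLine, hr, ih h.2]

lemma isTestLine_false_of_not_mem (l : List String)
    (h : ("require" : String) ∉ l) : isTestLine l false = false := by
  induction l with
  | nil => rfl
  | cons t r ih =>
    have hr : t ≠ "require" := fun he => h (by simp [he])
    have hrm : ("require" : String) ∉ r := fun hm => h (by simp [hm])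
    simp [isTestLine, hr, ih hrm]

lemma pyRange_nil_of_le {a b : Int} (h : b ≤ a) : PySem.List.pyRange a b = [] := by
  refine List.eq_nil_iff_forall_not_mem.mpr (fun x hx => ?_)
  rw [PySem.List.mem_pyRange_one] at hx
  omega

-- A's inner j-loop from index j is a search in the dropped suffix
lemma scanJ_eq (mots : List String) (j : Nat) :
    isTestScanJ mots (PySem.List.pyRange (j : Int) (mots.length : Int))
      = (mots.drop j).any (fun t => t == "'test_helper'") := by
  generalize hk : mots.length - j = k
  induction k generalizing j with
  | zero =>
    have hj : mots.length ≤ j := by omega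
    rw [pyRange_nil_of_le (by exact_mod_cast hj), List.drop_eq_nil_of_le hj]
    rfl
  | succ k ih =>
    have hj : j < mots.length := by omega
    rw [PySem.List.pyRange_one_cons (by exact_mod_cast hj)]
    show (if PySem.List.pyGetD mots (j : Int) "" == "'test_helper'" then true
          else isTestScanJ mots (PySem.List.pyRange ((j : Int) + 1) (mots.length : Int)))
        = (mots.drop j).any (fun t => t == "'test_helper'")
    rw [PySem.List.pyGetD_eq_getElem mots "" (by positivity) (by exact_mod_cast hj)]
    rw [List.drop_eq_getElem_cons hj, List.any_cons]
    have hcast : ((j : Int) + 1) = ((j + 1 : Nat) : Int) := by push_cast; ring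
    rw [hcast, ih (j + 1) (by omega)]
    simp [Int.toNat_natCast]
    by_cases hh : mots[j] = "'test_helper'" <;> simp [hh]

-- A's outer i-loop from index i equals B's flat flag pass on the dropped suffix
lemma scanI_eq (mots : List String) (i : Nat) :
    isTestScanI mots (PySem.List.pyRange (i : Int) (mots.length : Int))
      = isTestLine (mots.drop i) false := by
  generalize hk : mots.length - i = k
  induction k generalizing i with
  | zero =>
    have hi : mots.length ≤ i := by omega
    rw [pyRange_nil_of_le (by exact_mod_cast hi), List.drop_eq_nil_of_le hi]
    rfl
  | succ k ih =>
    have hi : i < mots.length := by omega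
    rw [PySem.List.pyRange_one_cons (by exact_mod_cast hi)]
    show (if PySem.List.pyGetD mots (i : Int) "" == "require" then
            if isTestScanJ mots (PySem.List.pyRange ((i : Int) + 1) (mots.length : Int)) then true
            else isTestScanI mots (PySem.List.pyRange ((i : Int) + 1) (mots.length : Int))
          else isTestScanI mots (PySem.List.pyRange ((i : Int) + 1) (mots.length : Int)))
        = isTestLine (mots.drop i) false
    rw [PySem.List.pyGetD_eq_getElem mots "" (by positivity) (by exact_mod_cast hi)]
    have hcast : ((i : Int) + 1) = ((i + 1 : Nat) : Int) := by push_cast; ring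
    rw [hcast, scanJ_eq mots (i + 1), ih (i + 1) (by omega)]
    rw [List.drop_eq_getElem_cons hi]
    simp only [Int.toNat_natCast]
    by_cases hr : mots[i] = "require"
    · simp only [hr]
      simp only [isTestLine, beq_self_eq_true, if_true, isTestLine_true]
      by_cases ha : (mots.drop (i + 1)).any (fun t => t == "'test_helper'") = true
      · simp [ha]
      · rw [Bool.not_eq_true] at ha
        simp [ha, isTestLine_false_of_any_false _ ha]
    · simp [isTestLine, hr]

-- split₀ ignores a run of whitespace: go on an all-space string just flushes
lemma go_spaces (sp : List Char) (cur : List Char) (acc : List (List Char))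
    (h : ∀ c ∈ sp, PySem.Chars.isspace c = true) :
    PySem.Chars.split₀.go sp cur acc = PySem.Chars.split₀.go [] cur acc := by
  induction sp generalizing cur acc with
  | nil => rfl
  | cons c rest ih =>
    have hc : PySem.Chars.isspace c = true := h c (by simp)
    have hrest : ∀ x ∈ rest, PySem.Chars.isspace x = true := fun x hx => h x (by simp [hx])
    by_cases hcur : cur.isEmpty
    · rw [show PySem.Chars.split₀.go (c :: rest) cur acc = PySem.Chars.split₀.go rest [] acc by
        simp [PySem.Chars.split₀.go, hc, hcur]]
      rw [ih [] acc hrest]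
      have hcur' : cur = [] := List.isEmpty_iff.mp hcur
      subst hcur'
      rfl
    · rw [show PySem.Chars.split₀.go (c :: rest) cur acc
            = PySem.Chars.split₀.go rest [] (cur.reverse :: acc) by
        simp [PySem.Chars.split₀.go, hc, hcur]]
      rw [ih [] (cur.reverse :: acc) hrest]
      simp [PySem.Chars.split₀.go, hcur]

lemma go_append_spaces (s sp : List Char) (cur : List Char) (acc : List (List Char))
    (h : ∀ c ∈ sp, PySem.Chars.isspace c = true) :
    PySem.Chars.split₀.go (s ++ sp) cur acc = PySem.Chars.split₀.go s cur acc := by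
  induction s generalizing cur acc with
  | nil => simpa using go_spaces sp cur acc h
  | cons c rest ih =>
    by_cases hc : PySem.Chars.isspace c
    · by_cases hcur : cur.isEmpty
      · simp only [List.cons_append, PySem.Chars.split₀.go, hc, hcur, if_true]
        exact ih [] acc
      · simp only [List.cons_append, PySem.Chars.split₀.go, hc, hcur, if_true, Bool.false_eq_true,
          if_false]
        exact ih [] (cur.reverse :: acc)
    · simp only [List.cons_append, PySem.Chars.split₀.go, hc, Bool.false_eq_true, if_false]
      exact ih (c :: cur) acc

lemma go_dropWhile (s : List Char) (acc : List (List Char)) :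
    PySem.Chars.split₀.go (List.dropWhile PySem.Chars.isspace s) [] acc
      = PySem.Chars.split₀.go s [] acc := by
  induction s with
  | nil => rfl
  | cons c rest ih =>
    by_cases hc : PySem.Chars.isspace c
    · rw [List.dropWhile_cons_of_pos hc, ih]
      simp [PySem.Chars.split₀.go, hc]
    · rw [List.dropWhile_cons_of_neg (by simp [hc])]

lemma chars_split₀_strip (s : List Char) :
    PySem.Chars.split₀ (PySem.Chars.strip s) = PySem.Chars.split₀ s := by
  show PySem.Chars.split₀.go (PySem.Chars.rstrip (PySem.Chars.lstrip s)) [] []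
      = PySem.Chars.split₀.go s [] []
  have hl : PySem.Chars.split₀.go (PySem.Chars.lstrip s) [] [] = PySem.Chars.split₀.go s [] [] :=
    go_dropWhile s []
  set t := PySem.Chars.lstrip s with ht
  have hsplit : t = PySem.Chars.rstrip t ++ (List.takeWhile PySem.Chars.isspace t.reverse).reverse := by
    show t = (List.dropWhile PySem.Chars.isspace t.reverse).reverse
            ++ (List.takeWhile PySem.Chars.isspace t.reverse).reverse
    conv_lhs => rw [← t.reverse_reverse,
      ← List.takeWhile_append_dropWhile (p := PySem.Chars.isspace) (l := t.reverse)]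
    rw [List.reverse_append]
  have hsp : ∀ c ∈ (List.takeWhile PySem.Chars.isspace t.reverse).reverse,
      PySem.Chars.isspace c = true := by
    intro c hc
    exact List.mem_takeWhile_imp (List.mem_reverse.mp hc)
  calc PySem.Chars.split₀.go (PySem.Chars.rstrip t) [] []
      = PySem.Chars.split₀.go (PySem.Chars.rstrip t
          ++ (List.takeWhile PySem.Chars.isspace t.reverse).reverse) [] [] :=
        (go_append_spaces _ _ [] [] hsp).symm
    _ = PySem.Chars.split₀.go t [] [] := by rw [← hsplit]
    _ = PySem.Chars.split₀.go s [] [] := hl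

lemma str_split₀_strip (s : String) :
    PySem.Str.split₀ (PySem.Str.strip s) = PySem.Str.split₀ s := by
  show ((String.ofList (PySem.Chars.strip s.toList)).toList |> PySem.Chars.split₀).map String.ofList
      = (PySem.Chars.split₀ s.toList).map String.ofList
  rw [String.toList_ofList, chars_split₀_strip]

-- every token produced by split₀.go is in acc, extends cur by a prefix of the rest, or is an infix
lemma go_tokens (s : List Char) (cur : List Char) (acc : List (List Char)) (t : List Char)
    (ht : t ∈ PySem.Chars.split₀.go s cur acc) :
    t ∈ acc ∨ (∃ m, m <+: s ∧ t = cur.reverse ++ m) ∨ t <:+: s := by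
  induction s generalizing cur acc with
  | nil =>
    by_cases hcur : cur.isEmpty
    · rw [show PySem.Chars.split₀.go [] cur acc = acc.reverse by simp [PySem.Chars.split₀.go, hcur]]
        at ht
      exact Or.inl (List.mem_reverse.mp ht)
    · rw [show PySem.Chars.split₀.go [] cur acc = (cur.reverse :: acc).reverse by
        simp [PySem.Chars.split₀.go, hcur]] at ht
      rcases List.mem_cons.mp (List.mem_reverse.mp ht) with h | h
      · exact Or.inr (Or.inl ⟨[], List.nil_prefix, by simp [h]⟩)
      · exact Or.inl h
  | cons c rest ih =>
    by_cases hc : PySem.Chars.isspace c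
    · by_cases hcur : cur.isEmpty
      · rw [show PySem.Chars.split₀.go (c :: rest) cur acc = PySem.Chars.split₀.go rest [] acc by
          simp [PySem.Chars.split₀.go, hc, hcur]] at ht
        rcases ih [] acc ht with h | ⟨m, hm, he⟩ | h
        · exact Or.inl h
        · exact Or.inr (Or.inr (List.infix_cons (by simpa [he] using hm.isInfix)))
        · exact Or.inr (Or.inr (List.infix_cons h))
      · rw [show PySem.Chars.split₀.go (c :: rest) cur acc
              = PySem.Chars.split₀.go rest [] (cur.reverse :: acc) by
          simp [PySem.Chars.split₀.go, hc, hcur]] at ht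
        rcases ih [] (cur.reverse :: acc) ht with h | ⟨m, hm, he⟩ | h
        · rcases List.mem_cons.mp h with h | h
          · exact Or.inr (Or.inl ⟨[], List.nil_prefix, by simp [h]⟩)
          · exact Or.inl h
        · exact Or.inr (Or.inr (List.infix_cons (by simpa [he] using hm.isInfix)))
        · exact Or.inr (Or.inr (List.infix_cons h))
    · rw [show PySem.Chars.split₀.go (c :: rest) cur acc
            = PySem.Chars.split₀.go rest (c :: cur) acc by
        simp [PySem.Chars.split₀.go, hc]] at ht
      rcases ih (c :: cur) acc ht with h | ⟨m, hm, he⟩ | h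
      · exact Or.inl h
      · refine Or.inr (Or.inl ⟨c :: m, ?_, by simp [he]⟩)
        obtain ⟨u, hu⟩ := hm
        exact ⟨u, by simp [hu]⟩
      · exact Or.inr (Or.inr (List.infix_cons h))

lemma token_infix (s t : List Char) (ht : t ∈ PySem.Chars.split₀ s) : t <:+: s := by
  rcases go_tokens s [] [] t ht with h | ⟨m, hm, he⟩ | h
  · cases h
  · simpa [he] using hm.isInfix
  · exact h

lemma not_require_token (ligne : String) (h : PySem.Str.isIn "require" ligne = false) :
    ("require" : String) ∉ PySem.Str.split₀ ligne := by
  intro hmem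
  obtain ⟨cs, hcs, heq⟩ := List.mem_map.mp hmem
  have hcs' : cs = ("require" : String).toList := by
    rw [← heq, String.toList_ofList]
  have hinf : ("require" : String).toList <:+: ligne.toList := hcs' ▸ token_infix _ _ hcs
  have := (PySem.Str.isIn_iff_infix "require" ligne).mpr hinf
  rw [h] at this
  cases this

lemma isTest_eq_alt (lignes : List String) : isTest lignes = isTest_alt lignes := by
  induction lignes with
  | nil => rfl
  | cons ligne rest ih =>
    show (if PySem.Str.isIn "require" ligne then
            let mots := PySem.Str.split₀ (PySem.Str.strip ligne)
            if isTestScanI mots (PySem.List.pyRange 0 (mots.length : Int)) then 1 else isTest rest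
          else isTest rest)
        = (if isTestLine (PySem.Str.split₀ ligne) false then 1 else isTest_alt rest)
    by_cases hg : PySem.Str.isIn "require" ligne = true
    · rw [if_pos hg]
      show (if isTestScanI (PySem.Str.split₀ (PySem.Str.strip ligne))
              (PySem.List.pyRange 0 ((PySem.Str.split₀ (PySem.Str.strip ligne)).length : Int))
            then (1 : Int) else isTest rest)
          = (if isTestLine (PySem.Str.split₀ ligne) false then 1 else isTest_alt rest)
      rw [str_split₀_strip]
      have h0 := scanI_eq (PySem.Str.split₀ ligne) 0
      rw [show ((0 : Nat) : Int) = 0 by norm_num, List.drop_zero] at h0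
      rw [h0]
      by_cases hb : isTestLine (PySem.Str.split₀ ligne) false = true
      · rw [if_pos hb, if_pos hb]
      · rw [Bool.not_eq_true] at hb
        rw [hb]
        simpa using ih
    · rw [Bool.not_eq_true] at hg
      rw [hg]
      have hflag : isTestLine (PySem.Str.split₀ ligne) false = false :=
        isTestLine_false_of_not_mem _ (not_require_token ligne hg)
      rw [hflag]
      simpa using ih

-- ===== VERDICT (by name: the statement is the Claim_ definition above) =====
theorem isTest_spec : Claim_equal_isTest := by
  unfold Claim_equal_isTest Spec_isTest
  intro lignes _ _
  exact isTest_eq_alt lignes
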